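-- pv_equiv track=rewrite | github.com/shutpa01/cryptic_solver_v2 | stages/compound.py | _is_enumeration
-- ===== SOURCE A (Python) =====
-- def _is_enumeration(word: str) -> bool:
--     """Check if a word is an enumeration pattern like '8', '2,5', '3-4', '2,3,4'."""
--     # Remove common punctuation
--     cleaned = word.strip('()[]')
--
--     # Pure digits
--     if cleaned.isdigit():
--         return True
--
--     # Comma or hyphen separated digits: "2,5" or "3-4" or "2,3,4"
--     if all(c.isdigit() or c in ',.-' for c in cleaned) and any(
--             c.isdigit() for c in cleaned):
--         return True
--
--     return False
-- ===== SOURCE B (Python) =====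
-- def _is_enumeration(word: str) -> bool:
--     """Tokenize: split the cleaned word on each separator, then judge the tokens:
--     some token must be nonempty and every nonempty token must be pure digits."""
--     cleaned = word.strip('()[]')
--     parts = [cleaned]
--     for sep in ',.-':
--         parts = [piece for part in parts for piece in part.split(sep)]
--     return any(parts) and all(p.isdigit() for p in parts if p)
-- ===== Notes on version B (the rewrite author's own statement) =====
-- stated objective: alternative
-- what changed: Replaced A's three character-level scans (isdigit, all-valid, any-digit) by a tokenizer: split the cleaned word on each separator character and judge the resulting tokens -- some token must be nonempty and every nonempty token must be pure digits.
import Mathlib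
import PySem

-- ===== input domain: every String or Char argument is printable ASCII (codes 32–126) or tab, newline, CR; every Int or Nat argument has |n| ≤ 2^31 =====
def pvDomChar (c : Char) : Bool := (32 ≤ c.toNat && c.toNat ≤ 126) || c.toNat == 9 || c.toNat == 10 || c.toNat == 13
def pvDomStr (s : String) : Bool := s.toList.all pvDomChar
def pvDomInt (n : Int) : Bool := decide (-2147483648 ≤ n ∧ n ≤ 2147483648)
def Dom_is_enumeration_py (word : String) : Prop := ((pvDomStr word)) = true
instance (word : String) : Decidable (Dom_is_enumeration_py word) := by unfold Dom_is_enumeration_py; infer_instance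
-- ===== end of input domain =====

-- B replaces A's three character scans by a tokenizer: split on each separator and judge the tokens (objective: alternative decomposition).

-- ===== PORT A =====
-- A: strip '()[]', then three scans — pure-digit test, all-valid test, any-digit test.
def is_enumeration_py (word : String) : Bool :=
  let cleaned := PySem.Str.stripChars word "()[]"
  if PySem.Str.strIsdigit cleaned then true
  else if cleaned.toList.all (fun c => PySem.Chars.isdigit c || PySem.Chars.isIn [c] [',', '.', '-'])
          && cleaned.toList.any (fun c => PySem.Chars.isdigit c) then true
  else false

-- ===== PORT B =====
-- B: split the cleaned word on ',', '.', '-' in turn; some token nonempty and every nonempty token pure digits.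
def is_enumeration_py_alt (word : String) : Bool :=
  let cleaned := (PySem.Str.stripChars word "()[]").toList
  let parts := [',', '.', '-'].foldl
    (fun ps sep => ps.flatMap (fun p => PySem.Chars.splitOn p [sep])) [cleaned]
  parts.any (fun p => !p.isEmpty)
    && parts.all (fun p => p.isEmpty || PySem.Chars.strIsdigit p)

-- ===== PRECONDITION & SPEC =====
def Spec_is_enumeration_py (word : String) (out : Bool) : Prop := out = is_enumeration_py_alt word
instance (word : String) (out : Bool) : Decidable (Spec_is_enumeration_py word out) := by unfold Spec_is_enumeration_py; infer_instance

-- ===== CLAIM (what is proved, stated in full; the proofs are below) =====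
def Claim_equal_is_enumeration_py : Prop := ∀ (word : String), Dom_is_enumeration_py word → Spec_is_enumeration_py word (is_enumeration_py word)

-- ===== LEMMAS AND PROOFS =====

-- the concatenation of the pieces produced by splitOn.go is the input minus the separator char
theorem go_flatten (s : Char) (l : List Char) :
    ∀ (fuel : Nat) (cur : List Char) (acc : List (List Char)), l.length < fuel →
    (PySem.Chars.splitOn.go [s] fuel l cur acc).flatten
      = acc.reverse.flatten ++ cur.reverse ++ l.filter (fun c => !(c == s)) := by
  induction l with
  | nil =>
    intro fuel cur acc h
    match fuel with
    | f + 1 => simp [PySem.Chars.splitOn.go]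
  | cons c rest ih =>
    intro fuel cur acc h
    match fuel with
    | f + 1 =>
      rw [PySem.Chars.splitOn.go]
      by_cases hc : c = s
      · subst hc
        simp only [List.isPrefixOf, beq_self_eq_true, Bool.true_and, if_pos, List.length_cons,
          List.length_nil, Nat.zero_add, List.drop_succ_cons, List.drop_zero]
        rw [ih f [] (cur.reverse :: acc) (by simpa using h)]
        simp
      · have hpre : [s].isPrefixOf (c :: rest) = false := by
          simp [List.isPrefixOf, beq_eq_false_iff_ne.2 (Ne.symm hc)]
        rw [if_neg (by simp [hpre])]
        rw [ih f (c :: cur) acc (by simpa using h)]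
        simp [hc]

theorem splitOn_flatten (s : Char) (l : List Char) :
    (PySem.Chars.splitOn l [s]).flatten = l.filter (fun c => !(c == s)) := by
  rw [PySem.Chars.splitOn]
  simpa using go_flatten s l (l.length + 1) [] [] (by omega)

theorem any_nonempty_eq (ps : List (List Char)) :
    (ps.any (fun p => !p.isEmpty)) = !ps.flatten.isEmpty := by
  induction ps with
  | nil => simp
  | cons p ps ih =>
    rcases p with _ | ⟨c, q⟩ <;> simp [ih]

theorem piece_test_eq (p : List Char) :
    (p.isEmpty || PySem.Chars.strIsdigit p) = p.all PySem.Chars.isdigit := by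
  rcases p with _ | ⟨c, q⟩
  · simp
  · simp [PySem.Chars.strIsdigit]

theorem all_digit_eq (ps : List (List Char)) :
    (ps.all (fun p => p.isEmpty || PySem.Chars.strIsdigit p))
      = ps.flatten.all PySem.Chars.isdigit := by
  induction ps with
  | nil => simp
  | cons p ps ih =>
    rw [List.all_cons, ih, List.flatten_cons, List.all_append]
    simp [piece_test_eq]

theorem flatMap_split_flatten (s : Char) (ps : List (List Char)) :
    ((ps.flatMap (fun p => PySem.Chars.splitOn p [s])).flatten)
      = ps.flatten.filter (fun c => !(c == s)) := by
  induction ps with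
  | nil => simp
  | cons p ps ih => simp [List.flatMap_cons, splitOn_flatten, ih, List.filter_append]

theorem is_enumeration_py_alt_eq (word : String) :
    is_enumeration_py_alt word
      = ((!((PySem.Str.stripChars word "()[]").toList.filter
            (fun c => !(c == ',') && !(c == '.') && !(c == '-'))).isEmpty)
        && ((PySem.Str.stripChars word "()[]").toList.filter
            (fun c => !(c == ',') && !(c == '.') && !(c == '-'))).all PySem.Chars.isdigit) := by
  unfold is_enumeration_py_alt
  simp only [List.foldl_cons, List.foldl_nil]
  rw [any_nonempty_eq, all_digit_eq]
  rw [flatMap_split_flatten, flatMap_split_flatten]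
  have h1 : ([ (PySem.Str.stripChars word "()[]").toList ].flatMap
      (fun p => PySem.Chars.splitOn p [','])).flatten
      = (PySem.Str.stripChars word "()[]").toList.filter (fun c => !(c == ',')) := by
    simp [splitOn_flatten]
  rw [h1, List.filter_filter, List.filter_filter]
  simp [Bool.and_comm, Bool.and_left_comm]

-- A collapses to its second test: a nonempty all-digit string passes that test too
theorem is_enumeration_py_eq (word : String) :
    is_enumeration_py word
      = ((PySem.Str.stripChars word "()[]").toList.all
          (fun c => PySem.Chars.isdigit c || PySem.Chars.isIn [c] [',', '.', '-'])
        && (PySem.Str.stripChars word "()[]").toList.any (fun c => PySem.Chars.isdigit c)) := by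
  unfold is_enumeration_py
  simp only [PySem.Str.strIsdigit_eq]
  by_cases h : PySem.Chars.strIsdigit (PySem.Str.stripChars word "()[]").toList = true
  · rw [if_pos h]
    rcases hl : (PySem.Str.stripChars word "()[]").toList with _ | ⟨c, rest⟩
    · rw [hl] at h; simp [PySem.Chars.strIsdigit] at h
    · rw [hl] at h
      simp only [PySem.Chars.strIsdigit, Bool.and_eq_true, List.all_eq_true] at h
      symm
      simp only [Bool.and_eq_true, List.all_eq_true, List.any_eq_true]
      exact ⟨fun x hx => by simp [h.2 x hx], c, List.mem_cons_self, h.2 c List.mem_cons_self⟩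
  · rw [if_neg h]
    split_ifs with hc
    · exact hc.symm
    · simp only [Bool.not_eq_true] at hc; exact hc.symm

theorem isdigit_sep_false : PySem.Chars.isdigit ',' = false ∧ PySem.Chars.isdigit '.' = false
    ∧ PySem.Chars.isdigit '-' = false := by decide

theorem isIn_single (c : Char) :
    PySem.Chars.isIn [c] [',', '.', '-'] = (c == ',' || c == '.' || c == '-') := by
  simp only [PySem.Chars.isIn, PySem.Chars.find, PySem.Chars.find.go, List.isPrefixOf,
    Bool.and_true]
  rcases eq_or_ne c ',' with rfl | e1
  · simp
  · rcases eq_or_ne c '.' with rfl | e2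
    · simp
    · rcases eq_or_ne c '-' with rfl | e3
      · simp
      · simp [beq_eq_false_iff_ne.2 e1, beq_eq_false_iff_ne.2 e2, beq_eq_false_iff_ne.2 e3]

-- ===== VERDICT (by name: the statement is the Claim_ definition above) =====
theorem is_enumeration_py_spec : Claim_equal_is_enumeration_py := by
  intro word _
  unfold Spec_is_enumeration_py
  rw [is_enumeration_py_eq, is_enumeration_py_alt_eq]
  obtain ⟨h1, h2, h3⟩ := isdigit_sep_false
  generalize (PySem.Str.stripChars word "()[]").toList = L
  simp only [isIn_single]
  rw [Bool.eq_iff_iff]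
  simp only [Bool.and_eq_true, List.all_eq_true, List.any_eq_true, Bool.or_eq_true,
    beq_iff_eq, Bool.not_eq_true', List.isEmpty_eq_false_iff_exists_mem, List.mem_filter,
    Bool.and_eq_true, Bool.not_eq_true', beq_eq_false_iff_ne, ne_eq]
  constructor
  · rintro ⟨hall, c, hc, hd⟩
    have hns1 : ¬c = ',' := by rintro rfl; simp_all
    have hns2 : ¬c = '.' := by rintro rfl; simp_all
    have hns3 : ¬c = '-' := by rintro rfl; simp_all
    refine ⟨⟨c, by tauto⟩, fun x hx => ?_⟩
    have := hall x hx.1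
    tauto
  · rintro ⟨⟨c, hc⟩, hall⟩
    refine ⟨fun x hx => ?_, c, by tauto, hall c hc⟩
    by_cases hx1 : x = ','
    · tauto
    · by_cases hx2 : x = '.'
      · tauto
      · by_cases hx3 : x = '-'
        · tauto
        · exact Or.inl (hall x (by tauto))
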